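-- pv_equiv track=rewrite | github.com/JRIngram/AdventOfCode | 2023/days/one.py | get_digit_word_order
-- ===== SOURCE A (Python) =====
-- def get_digit_word_order(line: str):
--     zero_index = line.find('zero')
--     nine_index = line.find('nine')
--     eight_index = line.find('eight')
--     seven_index = line.find('seven')
--     six_index = line.find('six')
--     five_index = line.find('five')
--     four_index = line.find('four')
--     three_index = line.find('three')
--     two_index = line.find('two')
--     one_index = line.find('one')
--     digit_dictionary = {
--         'zero': zero_index,
--         'one': one_index,
--         'two': two_index,
--         'three': three_index,
--         'four': four_index,
--         'five': five_index,
--         'six': six_index,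
--         'seven': seven_index,
--         'eight': eight_index,
--         'nine': nine_index
--     }
--     filtered_digit_dict = dict((k,v) for k,v in digit_dictionary.items() if v>-1)
--     digit_list = sorted(filtered_digit_dict.items(), key = lambda x : x[1])
--     return digit_list
-- ===== SOURCE B (Python) =====
-- WORDS = ('zero', 'one', 'two', 'three', 'four', 'five', 'six', 'seven', 'eight', 'nine')
--
-- def get_digit_word_order(line: str):
--     found = set()
--     result = []
--     for i in range(len(line)):
--         for word in WORDS:
--             if word not in found and line.startswith(word, i):
--                 result.append((word, i))
--                 found.add(word)
--     return result
-- ===== Notes on version B (the rewrite author's own statement) =====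
-- stated objective: alternative
-- what changed: A computes line.find for each of the ten digit-words, builds and filters a dict, then sorts the (word, index) pairs by index; B makes a single left-to-right scan of the string, appending each not-yet-seen digit-word the first time it matches at the current position, so the result comes out already in positional order and no dict or sort is needed.
import Mathlib
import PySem

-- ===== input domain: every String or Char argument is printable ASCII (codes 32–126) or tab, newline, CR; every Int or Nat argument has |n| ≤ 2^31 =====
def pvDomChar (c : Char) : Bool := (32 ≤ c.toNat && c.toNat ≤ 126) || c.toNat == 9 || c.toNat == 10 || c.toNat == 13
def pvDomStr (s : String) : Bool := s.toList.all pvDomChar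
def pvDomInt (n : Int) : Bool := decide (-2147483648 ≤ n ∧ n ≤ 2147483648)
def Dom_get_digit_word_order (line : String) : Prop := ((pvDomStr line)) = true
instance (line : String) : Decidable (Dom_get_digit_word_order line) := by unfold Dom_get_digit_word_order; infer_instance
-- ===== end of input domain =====

-- B replaces A's ten find-then-sort passes by one left-to-right scan that collects each
-- digit-word at its first occurrence in positional order, so no sort is needed (objective: alternative).

-- ===== PORT A =====
def get_digit_word_order (line : String) : List (String × Int) :=
  let zero_index := PySem.Str.find line "zero"
  let nine_index := PySem.Str.find line "nine"
  let eight_index := PySem.Str.find line "eight"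
  let seven_index := PySem.Str.find line "seven"
  let six_index := PySem.Str.find line "six"
  let five_index := PySem.Str.find line "five"
  let four_index := PySem.Str.find line "four"
  let three_index := PySem.Str.find line "three"
  let two_index := PySem.Str.find line "two"
  let one_index := PySem.Str.find line "one"
  let digit_dictionary : PySem.Dict String Int :=
    ((((((((((PySem.Dict.empty.insert "zero" zero_index).insert "one" one_index).insert
      "two" two_index).insert "three" three_index).insert "four" four_index).insert
      "five" five_index).insert "six" six_index).insert "seven" seven_index).insert
      "eight" eight_index).insert "nine" nine_index)
  let filtered_digit_dict : PySem.Dict String Int :=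
    (digit_dictionary.items.filter (fun kv => kv.2 > -1)).foldl
      (fun d kv => d.insert kv.1 kv.2) PySem.Dict.empty
  PySem.List.sorted filtered_digit_dict.items (fun x => x.2)

-- ===== PORT B =====
def pvWords : List String :=
  ["zero", "one", "two", "three", "four", "five", "six", "seven", "eight", "nine"]

-- one inner-loop step: 'if word not in found and line.startswith(word, i): append & mark'.
-- PySem.Str.startswith has no start parameter; for the loop's 0 <= i < len(line),
-- Python's line.startswith(word, i) is exactly startswith applied to the slice line[i:].
def pvStepWord (line : String) (i : Int)
    (st : PySem.Set String × List (String × Int)) (word : String) :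
    PySem.Set String × List (String × Int) :=
  if !PySem.Set.contains st.1 word &&
     PySem.Str.startswith (PySem.Str.slice line (some i) none) word
  then (PySem.Set.add st.1 word, st.2 ++ [(word, i)])
  else st

def get_digit_word_order_alt (line : String) : List (String × Int) :=
  ((PySem.List.pyRange 0 (PySem.Str.len line) 1).foldl
      (fun st i => pvWords.foldl (pvStepWord line i) st)
      (PySem.Set.ofList [], [])).2

-- ===== PRECONDITION & SPEC =====
def Spec_get_digit_word_order (line : String) (out : List (String × Int)) : Prop := out = get_digit_word_order_alt line
instance (line : String) (out : List (String × Int)) : Decidable (Spec_get_digit_word_order line out) := by unfold Spec_get_digit_word_order; infer_instance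

-- ===== CLAIM (what is proved, stated in full; the proofs are below) =====
def Claim_equal_get_digit_word_order : Prop := ∀ (line : String), Dom_get_digit_word_order line → Spec_get_digit_word_order line (get_digit_word_order line)

-- ===== LEMMAS AND PROOFS =====

-- first index of w in cs (A's line.find)
def pvFd (cs : List Char) (w : String) : Int := PySem.Chars.find cs w.toList

-- the pairs A keeps, restricted to first occurrences before position m
def pvF (cs : List Char) (m : Int) : List (String × Int) :=
  pvWords.filterMap
    (fun w => if 0 ≤ pvFd cs w ∧ pvFd cs w < m then some (w, pvFd cs w) else none)

-- A's ten (word, first index) pairs in dict-insertion order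
def pvTen (line : String) : List (String × Int) :=
  pvWords.map (fun w => (w, pvFd line.toList w))

lemma pvFd_neg {cs : List Char} {w : String} (h : ¬ 0 ≤ pvFd cs w) : pvFd cs w = -1 :=
  (PySem.Chars.find_eq_neg_one_iff cs w.toList).mpr
    (fun hinf => h ((PySem.Chars.find_nonneg_iff cs w.toList).mpr hinf))

lemma pvFd_spec {cs : List Char} {w : String} (hw : w.toList ≠ [])
    (h : 0 ≤ pvFd cs w) :
    (pvFd cs w).toNat < cs.length ∧ w.toList <+: cs.drop (pvFd cs w).toNat ∧
      ∀ j < (pvFd cs w).toNat, ¬ w.toList <+: cs.drop j := by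
  have hne : PySem.Chars.findFrom cs w.toList (0 : ℕ) ≠ -1 := by
    simp only [Nat.cast_zero, PySem.Chars.findFrom_zero]
    intro hc; rw [pvFd, hc] at h; omega
  have hs := PySem.Chars.findFrom_natCast_spec cs w.toList 0 (Nat.zero_le _) hne
  rw [Nat.cast_zero, PySem.Chars.findFrom_zero] at hs
  refine ⟨?_, hs.2.1, fun j hj => hs.2.2 j (Nat.zero_le _) hj⟩
  by_contra hge
  push_neg at hge
  have hdrop : w.toList <+: cs.drop (pvFd cs w).toNat := hs.2.1
  rw [List.drop_eq_nil_of_le hge] at hdrop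
  exact hw (List.prefix_nil.mp hdrop)

lemma pvFd_eq_coe_iff {cs : List Char} {w : String} (hw : w.toList ≠ [])
    {i : ℕ} (hi : i < cs.length) :
    pvFd cs w = (i : Int) ↔
      (w.toList <+: cs.drop i ∧ ∀ j < i, ¬ w.toList <+: cs.drop j) := by
  constructor
  · intro he
    have h0 : 0 ≤ pvFd cs w := by omega
    have hs := pvFd_spec hw h0
    have hti : (pvFd cs w).toNat = i := by omega
    rw [hti] at hs
    exact ⟨hs.2.1, fun j hj => hs.2.2 j hj⟩
  · rintro ⟨hp, hmin⟩
    have hinf : w.toList <:+: cs := hp.isInfix.trans (List.drop_suffix i cs).isInfix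
    have h0 : 0 ≤ pvFd cs w := (PySem.Chars.find_nonneg_iff cs w.toList).mpr hinf
    have hs := pvFd_spec hw h0
    have hle : i ≤ (pvFd cs w).toNat := by
      by_contra hlt
      push_neg at hlt
      exact hmin _ hlt hs.2.1
    have hge : (pvFd cs w).toNat ≤ i := by
      by_contra hlt
      push_neg at hlt
      exact hs.2.2 i hlt hp
    omega

lemma pvWords_ne_nil : ∀ w ∈ pvWords, w.toList ≠ [] := by decide

lemma pvWords_nodup : pvWords.Nodup := by decide

lemma pvWords_no_prefix :
    ∀ w₁ ∈ pvWords, ∀ w₂ ∈ pvWords, w₁.toList <+: w₂.toList → w₁ = w₂ := by decide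

-- any two digit-words matching at the same position are equal
lemma pvMatch_unique {cs : List Char} {m : ℕ} {w₁ w₂ : String}
    (h₁ : w₁ ∈ pvWords) (h₂ : w₂ ∈ pvWords)
    (p₁ : w₁.toList <+: cs.drop m) (p₂ : w₂.toList <+: cs.drop m) : w₁ = w₂ := by
  rcases List.prefix_or_prefix_of_prefix p₁ p₂ with h | h
  · exact pvWords_no_prefix w₁ h₁ w₂ h₂ h
  · exact (pvWords_no_prefix w₂ h₂ w₁ h₁ h).symm

lemma pvContains_add (S : PySem.Set String) (w w' : String) :
    PySem.Set.contains (PySem.Set.add S w) w' =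
      (PySem.Set.contains S w' || w' == w) := by
  simp only [PySem.Set.add, PySem.Set.contains]
  by_cases h : List.contains S w = true
  · rw [if_pos h]
    by_cases h' : w' = w
    · subst h'; rw [h]; simp
    · simp [h']
  · rw [if_neg h, List.contains_append]
    simp [List.contains_cons, beq_eq_decide]
lemma pvInner (line : String) (m : ℕ) (hm : m < line.toList.length) :
    ∀ (ws : List String) (S : PySem.Set String) (L : List (String × Int)),
    ws.Nodup → (∀ w ∈ ws, w.toList ≠ []) →
    (∀ w ∈ ws, (PySem.Set.contains S w = true ↔
        (0 ≤ pvFd line.toList w ∧ pvFd line.toList w < (m : Int)))) →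
    (∀ w', PySem.Set.contains ((ws.foldl (pvStepWord line (m : Int)) (S, L)).1) w' = true ↔
        (PySem.Set.contains S w' = true ∨ (w' ∈ ws ∧ pvFd line.toList w' = (m : Int)))) ∧
    (ws.foldl (pvStepWord line (m : Int)) (S, L)).2 =
      L ++ (ws.filter (fun w => pvFd line.toList w == (m : Int))).map
            (fun w => (w, (m : Int))) := by
  intro ws
  induction ws with
  | nil => intro S L _ _ _; simp
  | cons w ws ih =>
    intro S L hnd hne hcont
    have hwne : w.toList ≠ [] := hne w (by simp)
    have hcondIff : (!PySem.Set.contains S w &&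
        PySem.Str.startswith (PySem.Str.slice line (some (m : Int)) none) w) = true ↔
        pvFd line.toList w = (m : Int) := by
      have hslice : (PySem.Str.slice line (some (m : Int)) none).toList =
          line.toList.drop m := by
        simp [PySem.Str.slice, PySem.List.slice_from_natCast]
      rw [Bool.and_eq_true, Bool.not_eq_eq_eq_not, Bool.not_true,
        PySem.Str.startswith_eq, hslice, PySem.Chars.startswith_iff]
      constructor
      · rintro ⟨hc, hp⟩
        have hnotlt : ¬ (0 ≤ pvFd line.toList w ∧ pvFd line.toList w < (m : Int)) := by
          intro hx
          rw [(hcont w (by simp)).mpr hx] at hc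
          simp at hc
        have h0 : 0 ≤ pvFd line.toList w :=
          (PySem.Chars.find_nonneg_iff line.toList w.toList).mpr
            (hp.isInfix.trans (List.drop_suffix m line.toList).isInfix)
        have hs := pvFd_spec hwne h0
        have : ¬ (m < (pvFd line.toList w).toNat) := fun hlt => hs.2.2 m hlt hp
        omega
      · intro hfe
        have h0 : 0 ≤ pvFd line.toList w := by omega
        have hs := pvFd_spec hwne h0
        have htn : (pvFd line.toList w).toNat = m := by omega
        have hcf : PySem.Set.contains S w = false := by
          rw [← Bool.not_eq_true]
          intro hc
          have := (hcont w (by simp)).mp hc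
          omega
        exact ⟨hcf, by rw [← htn]; exact hs.2.1⟩
    simp only [List.foldl_cons, pvStepWord]
    by_cases hc : pvFd line.toList w = (m : Int)
    · rw [if_pos (hcondIff.mpr hc)]
      have hwnotmem : w ∉ ws := (List.nodup_cons.mp hnd).1
      have ihr := ih (PySem.Set.add S w) (L ++ [(w, (m : Int))])
        (List.nodup_cons.mp hnd).2 (fun x hx => hne x (by simp [hx]))
        (fun x hx => by
          rw [pvContains_add]
          have hxw : (x == w) = false := beq_eq_false_iff_ne.mpr (fun h => hwnotmem (h ▸ hx))
          rw [hxw, Bool.or_false]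
          exact hcont x (by simp [hx]))
      refine ⟨fun w' => ?_, ?_⟩
      · rw [ihr.1 w', pvContains_add]
        simp only [Bool.or_eq_true, beq_iff_eq, List.mem_cons]
        constructor
        · rintro (⟨h | h⟩ | ⟨h1, h2⟩)
          · exact Or.inl h
          · exact Or.inr ⟨Or.inl h, h ▸ hc⟩
          · exact Or.inr ⟨Or.inr h1, h2⟩
        · rintro (h | ⟨h1 | h1, h2⟩)
          · exact Or.inl (Or.inl h)
          · exact Or.inl (Or.inr h1)
          · exact Or.inr ⟨h1, h2⟩
      · rw [ihr.2]
        have hb : (pvFd line.toList w == (m : Int)) = true := beq_iff_eq.mpr hc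
        simp [List.filter_cons, hb]
    · rw [if_neg (fun h => hc (hcondIff.mp h))]
      have ihr := ih S L (List.nodup_cons.mp hnd).2
        (fun x hx => hne x (by simp [hx]))
        (fun x hx => hcont x (by simp [hx]))
      refine ⟨fun w' => ?_, ?_⟩
      · rw [ihr.1 w']
        simp only [List.mem_cons]
        constructor
        · rintro (h | ⟨h1, h2⟩)
          · exact Or.inl h
          · exact Or.inr ⟨Or.inr h1, h2⟩
        · rintro (h | ⟨h1 | h1, h2⟩)
          · exact Or.inl h
          · exact absurd (h1 ▸ h2) hc
          · exact Or.inr ⟨h1, h2⟩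
      · rw [ihr.2]
        have hb : (pvFd line.toList w == (m : Int)) = false := beq_eq_false_iff_ne.mpr hc
        simp [List.filter_cons, hb]

lemma pvF_succ_perm (cs : List Char) (m : ℕ) :
    ∀ ws : List String,
    (ws.filterMap (fun w =>
        if 0 ≤ pvFd cs w ∧ pvFd cs w < ((m : Int) + 1) then some (w, pvFd cs w) else none)).Perm
      ((ws.filterMap (fun w =>
        if 0 ≤ pvFd cs w ∧ pvFd cs w < (m : Int) then some (w, pvFd cs w) else none)) ++
       (ws.filter (fun w => pvFd cs w == (m : Int))).map (fun w => (w, (m : Int)))) := by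
  intro ws
  induction ws with
  | nil => simp
  | cons w ws ih =>
    rw [List.filterMap_cons, List.filterMap_cons, List.filter_cons]
    by_cases hc : pvFd cs w = (m : Int)
    · rw [if_pos (show 0 ≤ pvFd cs w ∧ pvFd cs w < (m : Int) + 1 by omega),
        if_neg (show ¬ (0 ≤ pvFd cs w ∧ pvFd cs w < (m : Int)) by omega),
        show (pvFd cs w == (m : Int)) = true from beq_iff_eq.mpr hc, if_pos rfl,
        List.map_cons]
      refine List.Perm.trans (List.Perm.cons _ ih) ?_
      rw [hc]
      exact List.perm_middle.symm
    · by_cases h0 : 0 ≤ pvFd cs w ∧ pvFd cs w < (m : Int)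
      · rw [if_pos (show 0 ≤ pvFd cs w ∧ pvFd cs w < (m : Int) + 1 by omega),
          if_pos h0,
          show (pvFd cs w == (m : Int)) = false from beq_eq_false_iff_ne.mpr hc,
          if_neg Bool.false_ne_true, List.cons_append]
        exact ih.cons _
      · rw [if_neg (show ¬ (0 ≤ pvFd cs w ∧ pvFd cs w < (m : Int) + 1) by omega),
          if_neg h0,
          show (pvFd cs w == (m : Int)) = false from beq_eq_false_iff_ne.mpr hc,
          if_neg Bool.false_ne_true]
        exact ih

lemma pvOuter (line : String) (m : ℕ) (hm : m ≤ line.toList.length) :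
    (∀ w ∈ pvWords,
      (PySem.Set.contains (((PySem.List.pyRange 0 (m : Int) 1).foldl
          (fun st i => pvWords.foldl (pvStepWord line i) st) (PySem.Set.ofList [], [])).1) w = true ↔
        (0 ≤ pvFd line.toList w ∧ pvFd line.toList w < (m : Int)))) ∧
    (((PySem.List.pyRange 0 (m : Int) 1).foldl
        (fun st i => pvWords.foldl (pvStepWord line i) st) (PySem.Set.ofList [], [])).2).Perm
      (pvF line.toList (m : Int)) ∧
    (((PySem.List.pyRange 0 (m : Int) 1).foldl
        (fun st i => pvWords.foldl (pvStepWord line i) st) (PySem.Set.ofList [], [])).2).Pairwise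
      (fun a b => a.2 < b.2) ∧
    (∀ p ∈ ((PySem.List.pyRange 0 (m : Int) 1).foldl
        (fun st i => pvWords.foldl (pvStepWord line i) st) (PySem.Set.ofList [], [])).2,
      p.2 < (m : Int)) := by
  induction m with
  | zero =>
    rw [show ((0 : ℕ) : Int) = 0 from rfl, PySem.List.pyRange_one_eq_nil le_rfl]
    refine ⟨?_, ?_, ?_, ?_⟩
    · intro w _
      constructor
      · intro h
        simp [PySem.Set.ofList, PySem.Set.contains] at h
      · intro h
        exact absurd h (by omega)
    · simp only [List.foldl_nil]
      have hF0 : pvF line.toList 0 = [] := by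
        rw [pvF, List.filterMap_eq_nil_iff]
        intro w _
        rw [if_neg (by omega)]
      rw [hF0]
    · simp
    · simp
  | succ m ih =>
    have hm' : m < line.toList.length := by omega
    have ihh := ih (Nat.le_of_lt hm')
    rw [show ((m + 1 : ℕ) : Int) = (m : Int) + 1 by push_cast; ring,
      PySem.List.pyRange_one_succ_right (by positivity), List.foldl_append]
    simp only [List.foldl_cons, List.foldl_nil]
    have hinner := pvInner line m hm' pvWords
      (((PySem.List.pyRange 0 (m : Int) 1).foldl
        (fun st i => pvWords.foldl (pvStepWord line i) st) (PySem.Set.ofList [], [])).1)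
      (((PySem.List.pyRange 0 (m : Int) 1).foldl
        (fun st i => pvWords.foldl (pvStepWord line i) st) (PySem.Set.ofList [], [])).2)
      pvWords_nodup pvWords_ne_nil ihh.1
    rw [Prod.mk.eta] at hinner
    refine ⟨?_, ?_, ?_, ?_⟩
    · intro w hw
      rw [hinner.1 w, ihh.1 w hw]
      constructor
      · rintro (h | ⟨_, h2⟩) <;> omega
      · intro h
        by_cases hlt : pvFd line.toList w < (m : Int)
        · exact Or.inl ⟨h.1, hlt⟩
        · exact Or.inr ⟨hw, by omega⟩
    · rw [hinner.2]
      refine List.Perm.trans (ihh.2.1.append_right _) ?_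
      exact (pvF_succ_perm line.toList m pvWords).symm
    · rw [hinner.2, List.pairwise_append]
      refine ⟨ihh.2.2.1, ?_, ?_⟩
      · have hall : ∀ a ∈ (pvWords.filter
            (fun w => pvFd line.toList w == (m : Int))).map (fun w => (w, (m : Int))),
            ∀ b ∈ (pvWords.filter
            (fun w => pvFd line.toList w == (m : Int))).map (fun w => (w, (m : Int))),
            a = b := by
          rintro a ha b hb
          simp only [List.mem_map, List.mem_filter, beq_iff_eq] at ha hb
          obtain ⟨w1, ⟨hw1, hf1⟩, rfl⟩ := ha
          obtain ⟨w2, ⟨hw2, hf2⟩, rfl⟩ := hb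
          have h1 := ((pvFd_eq_coe_iff (pvWords_ne_nil w1 hw1) hm').mp hf1).1
          have h2 := ((pvFd_eq_coe_iff (pvWords_ne_nil w2 hw2) hm').mp hf2).1
          rw [pvMatch_unique hw1 hw2 h1 h2]
        have hnd2 : ((pvWords.filter
            (fun w => pvFd line.toList w == (m : Int))).map (fun w => (w, (m : Int)))).Nodup := by
          refine List.Nodup.map ?_ (pvWords_nodup.filter _)
          intro a b hab
          exact (Prod.mk.injEq _ _ _ _ ▸ hab).1
        exact hnd2.imp_of_mem (fun ha hb hne => absurd (hall _ ha _ hb) hne)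
      · intro a ha b hb
        have h1 := ihh.2.2.2 a ha
        simp only [List.mem_map] at hb
        obtain ⟨w1, _, rfl⟩ := hb
        simpa using h1
    · rw [hinner.2]
      intro p hp
      rcases List.mem_append.mp hp with h | h
      · have := ihh.2.2.2 p h
        omega
      · simp only [List.mem_map] at h
        obtain ⟨w1, _, rfl⟩ := h
        simp

lemma pvItems_foldl_insert :
    ∀ (l : List (String × Int)) (d : PySem.Dict String Int),
    (∀ p ∈ l, ∀ q ∈ d.items, q.1 ≠ p.1) → (l.map Prod.fst).Nodup →
    (l.foldl (fun d kv => d.insert kv.1 kv.2) d).items = d.items ++ l := by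
  intro l
  induction l with
  | nil => intro d _ _; simp
  | cons kv l ih =>
    intro d hdis hnd
    rw [List.map_cons] at hnd
    have hkey : kv.1 ∉ l.map Prod.fst := (List.nodup_cons.mp hnd).1
    have hcf : PySem.Dict.contains d kv.1 = false := by
      rw [PySem.Dict.contains, ← Bool.not_eq_true, List.any_eq_true]
      rintro ⟨q, hq, hbe⟩
      exact hdis kv (by simp) q hq (beq_iff_eq.mp hbe)
    have hins : (d.insert kv.1 kv.2).items = d.items ++ [kv] := by
      rw [PySem.Dict.insert, if_neg (by rw [hcf]; exact Bool.false_ne_true)]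
    rw [List.foldl_cons]
    rw [ih (d.insert kv.1 kv.2)
      (fun p hp q hq => by
        rw [hins] at hq
        rcases List.mem_append.mp hq with h | h
        · exact hdis p (by simp [hp]) q h
        · rw [List.mem_singleton.mp h]
          intro he
          exact hkey (he ▸ List.mem_map_of_mem hp))
      (List.nodup_cons.mp hnd).2]
    rw [hins, List.append_assoc, List.singleton_append]

lemma pvF_top (line : String) :
    pvF line.toList ((line.toList.length : ℕ) : Int) =
      (pvTen line).filter (fun kv => decide (kv.2 > -1)) := by
  rw [pvF, pvTen]
  have key : ∀ ws : List String, (∀ w ∈ ws, w.toList ≠ []) →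
      ws.filterMap (fun w =>
        if 0 ≤ pvFd line.toList w ∧ pvFd line.toList w < ((line.toList.length : ℕ) : Int)
        then some (w, pvFd line.toList w) else none) =
      (ws.map (fun w => (w, pvFd line.toList w))).filter (fun kv => decide (kv.2 > -1)) := by
    intro ws
    induction ws with
    | nil => intro _; simp
    | cons w ws ih =>
      intro hne
      rw [List.filterMap_cons, List.map_cons, List.filter_cons]
      by_cases h0 : 0 ≤ pvFd line.toList w
      · have hs := pvFd_spec (hne w (by simp)) h0
        have hlt : pvFd line.toList w < ((line.toList.length : ℕ) : Int) := by omega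
        rw [if_pos ⟨h0, hlt⟩]
        have hb : (decide ((w, pvFd line.toList w).2 > -1)) = true := by
          simp only [decide_eq_true_eq]
          omega
        rw [hb, if_pos rfl, ih (fun x hx => hne x (by simp [hx]))]
      · have hneg : pvFd line.toList w = -1 := pvFd_neg h0
        rw [if_neg (by omega)]
        have hb : (decide ((w, pvFd line.toList w).2 > -1)) = false := by
          simp only [decide_eq_false_iff_not]
          omega
        rw [hb, if_neg Bool.false_ne_true, ih (fun x hx => hne x (by simp [hx]))]
  exact key pvWords pvWords_ne_nil

lemma pvTen_keys (line : String) : (pvTen line).map Prod.fst = pvWords := by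
  simp [pvTen, Function.comp_def]

-- ===== VERDICT (by name: the statement is the Claim_ definition above) =====
set_option maxHeartbeats 1000000 in
theorem get_digit_word_order_spec : Claim_equal_get_digit_word_order := by
  unfold Claim_equal_get_digit_word_order
  intro line _
  unfold Spec_get_digit_word_order
  simp only [get_digit_word_order, get_digit_word_order_alt]
  rw [PySem.Str.len_eq]
  obtain ⟨hcont, hperm, hpair, hbound⟩ := pvOuter line line.toList.length le_rfl
  have hchain :
      ((((((((((PySem.Dict.empty.insert "zero" (PySem.Str.find line "zero")).insert
        "one" (PySem.Str.find line "one")).insert "two" (PySem.Str.find line "two")).insert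
        "three" (PySem.Str.find line "three")).insert "four" (PySem.Str.find line "four")).insert
        "five" (PySem.Str.find line "five")).insert "six" (PySem.Str.find line "six")).insert
        "seven" (PySem.Str.find line "seven")).insert "eight" (PySem.Str.find line "eight")).insert
        "nine" (PySem.Str.find line "nine")) =
      (pvTen line).foldl (fun d kv => d.insert kv.1 kv.2) PySem.Dict.empty := by
    simp only [pvTen, pvWords, List.map_cons, List.map_nil, List.foldl_cons, List.foldl_nil,
      pvFd, ← PySem.Str.find_eq]
  have hAitems :
      (((((((((((PySem.Dict.empty.insert "zero" (PySem.Str.find line "zero")).insert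
        "one" (PySem.Str.find line "one")).insert "two" (PySem.Str.find line "two")).insert
        "three" (PySem.Str.find line "three")).insert "four" (PySem.Str.find line "four")).insert
        "five" (PySem.Str.find line "five")).insert "six" (PySem.Str.find line "six")).insert
        "seven" (PySem.Str.find line "seven")).insert "eight" (PySem.Str.find line "eight")).insert
        "nine" (PySem.Str.find line "nine"))).items = pvTen line := by
    rw [hchain]
    rw [pvItems_foldl_insert (pvTen line) PySem.Dict.empty
      (fun p _ q hq => absurd hq (by simp [PySem.Dict.empty]))
      (by rw [pvTen_keys]; exact pvWords_nodup)]
    simp [PySem.Dict.empty]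
  rw [hAitems]
  have hFkeys : (((pvTen line).filter (fun kv => decide (kv.2 > -1))).map Prod.fst).Nodup := by
    refine List.Nodup.sublist (List.Sublist.map _ List.filter_sublist) ?_
    rw [pvTen_keys]
    exact pvWords_nodup
  rw [pvItems_foldl_insert ((pvTen line).filter (fun kv => decide (kv.2 > -1))) PySem.Dict.empty
    (fun p _ q hq => absurd hq (by simp [PySem.Dict.empty])) hFkeys]
  rw [show (PySem.Dict.empty (κ := String) (ν := Int)).items = [] from rfl, List.nil_append]
  refine PySem.List.sorted_eq_of_perm_of_pairwise_lt _ _ _ ?_ hpair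
  rw [← pvF_top line]
  exact hperm
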